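-- pv_equiv track=rewrite | github.com/melo4/jianzhioffer | 把数字翻译成字符串.py | getTranslationCount
-- ===== SOURCE A (Python) =====
-- def getTranslationCount(num):
--     if not isinstance(num, int) or num < 0:
--         return
--     str_num= str(num)
--     length = len(str_num)
--     counts = [0] * length     # 表示从第i位开始的不同翻译的数目
--
--     for i in range(length-1, -1, -1):
--         if i == length - 1:
--             counts[i] = 1
--             continue
--
--         count = counts[i+1]
--         value = (ord(str_num[i]) - ord('0')) * 10 + (ord(str_num[i+1]) - ord('0'))
--         if i == length - 2:
--             count += 1 if 10 <= value <= 25 else 0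
--         else:
--             count += counts[i+2] if 10 <= value <= 25 else 0
--         counts[i] = count
--     return counts[0]
-- ===== SOURCE B (Python) =====
-- def getTranslationCount(num):
--     if not isinstance(num, int) or num < 0:
--         return
--     def count(n):
--         # translations of the decimal digits of n (n has no leading zeros)
--         if n < 10:
--             return 1
--         c = count(n // 10)
--         if 10 <= n % 100 <= 25:
--             c += count(n // 100)
--         return c
--     return count(num)
-- ===== Notes on version B (the rewrite author's own statement) =====
-- stated objective: alternative
-- what changed: B never converts the number to a string: it recurses on the integer itself, peeling off the last digit with floor-division and modulus and adding the two-back count whenever the trailing digit pair lies in the translatable range, instead of A's backward-filled DP array over the digit string.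
import Mathlib
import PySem

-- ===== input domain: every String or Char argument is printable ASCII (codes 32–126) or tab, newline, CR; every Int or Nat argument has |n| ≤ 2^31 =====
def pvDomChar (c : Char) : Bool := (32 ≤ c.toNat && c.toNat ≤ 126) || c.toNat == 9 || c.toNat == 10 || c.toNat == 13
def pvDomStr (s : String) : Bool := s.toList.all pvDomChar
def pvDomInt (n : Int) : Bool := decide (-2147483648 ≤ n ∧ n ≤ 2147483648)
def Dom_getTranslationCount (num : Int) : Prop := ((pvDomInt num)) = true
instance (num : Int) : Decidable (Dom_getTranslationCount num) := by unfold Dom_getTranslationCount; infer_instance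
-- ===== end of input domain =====

-- B recurses on the integer itself with // and % (no string at all) instead of A's backward DP array over the digit string; return values proved equal.

-- numeric value of the two-digit pair "ab" (A's subexpression (ord(x)-ord('0'))*10 + (ord(y)-ord('0')))
def pairVal (a b : Char) : Int := ((a.toNat : Int) - 48) * 10 + ((b.toNat : Int) - 48)

-- ===== PORT A =====
-- loop body of A's `for i in range(length-1, -1, -1)` (indices stay in range, so getD/set are exact for Python's counts[i], str_num[i])
def aStep (str_num : List Char) (length : Int) (counts : List Int) (i : Int) : List Int :=
  if i = length - 1 then counts.set i.toNat 1
  else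
    let count := counts.getD (i + 1).toNat 0
    let value := pairVal (str_num.getD i.toNat ' ') (str_num.getD (i + 1).toNat ' ')
    let count := if i = length - 2 then count + (if 10 ≤ value ∧ value ≤ 25 then 1 else 0)
      else count + (if 10 ≤ value ∧ value ≤ 25 then counts.getD (i + 2).toNat 0 else 0)
    counts.set i.toNat count

def getTranslationCount (num : Int) : Option Int :=
  if num < 0 then none else
  let str_num := PySem.Int.toChars num
  let length : Int := str_num.length
  let counts : List Int := List.replicate str_num.length 0
  let counts := (PySem.List.pyRange (length - 1) (-1) (-1)).foldl (aStep str_num length) counts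
  PySem.List.pyGet? counts 0

-- ===== PORT B =====
-- Source B's inner `count`: recursion on the integer, peeling the last digit with // and %
def bCount (n : Int) : Int :=
  if n < 10 then 1
  else
    let c := bCount (PySem.Int.floordiv n 10)
    if 10 ≤ PySem.Int.mod n 100 ∧ PySem.Int.mod n 100 ≤ 25 then c + bCount (PySem.Int.floordiv n 100) else c
termination_by n.toNat
decreasing_by
  · simp only [PySem.Int.floordiv_eq_ediv_of_pos (by omega : (0:Int) < 10)]; omega
  · simp only [PySem.Int.floordiv_eq_ediv_of_pos (by omega : (0:Int) < 100)]; omega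

def getTranslationCount_alt (num : Int) : Option Int :=
  if num < 0 then none else some (bCount num)

-- ===== PRECONDITION & SPEC =====
def Spec_getTranslationCount (num : Int) (out : Option Int) : Prop := out = getTranslationCount_alt num
instance (num : Int) (out : Option Int) : Decidable (Spec_getTranslationCount num out) := by unfold Spec_getTranslationCount; infer_instance

-- ===== CLAIM (what is proved, stated in full; the proofs are below) =====
def Claim_equal_getTranslationCount : Prop := ∀ (num : Int), Dom_getTranslationCount num → Spec_getTranslationCount num (getTranslationCount num)

-- ===== LEMMAS AND PROOFS =====

-- the common specification: number of translations of a digit string (head recurrence)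
def trT : List Char → Int
  | [] => 1
  | [_] => 1
  | a :: b :: t => trT (b :: t) + (if 10 ≤ pairVal a b ∧ pairVal a b ≤ 25 then trT t else 0)

theorem trT_singleton (xs : List Char) (h : xs.length = 1) : trT xs = 1 := by
  match xs, h with
  | [a], _ => rfl

theorem getD_set' (l : List Int) (k j : Nat) (v d : Int) :
    (l.set k v).getD j d = if k = j ∧ k < l.length then v else l.getD j d := by
  simp [List.getD_eq_getElem?_getD, List.getElem?_set]
  split_ifs with h1 h2 h3 <;> simp_all
  omega

theorem drop_cons (s : List Char) (k : Nat) (h : k < s.length) :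
    s.drop k = s.getD k ' ' :: s.drop (k + 1) := by
  rw [List.getD_eq_getElem s ' ' h]
  exact List.drop_eq_getElem_cons h

theorem trT_drop (s : List Char) (k : Nat) (h : k + 1 < s.length) :
    trT (s.drop k) = trT (s.drop (k + 1)) +
      (if 10 ≤ pairVal (s.getD k ' ') (s.getD (k + 1) ' ') ∧
          pairVal (s.getD k ' ') (s.getD (k + 1) ' ') ≤ 25
       then trT (s.drop (k + 2)) else 0) := by
  rw [drop_cons s k (by omega), drop_cons s (k + 1) h, trT]

-- A-side invariant: entries j ≥ k of counts hold trT of the suffix from j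
def InvA (s : List Char) (k : Nat) (counts : List Int) : Prop :=
  counts.length = s.length ∧
  ∀ j : Nat, k ≤ j → j < s.length → counts.getD j 0 = trT (s.drop j)

theorem aStep_inv (s : List Char) (k : Nat) (counts : List Int)
    (hk : k < s.length) (h : InvA s (k + 1) counts) :
    InvA s k (aStep s (s.length : Int) counts (k : Int)) := by
  obtain ⟨hlen, hinv⟩ := h
  have hcast1 : ((k : Int) + 1).toNat = k + 1 := by omega
  have hcast2 : ((k : Int) + 2).toNat = k + 2 := by omega
  unfold aStep
  by_cases hlast : k = s.length - 1
  · have : (k : Int) = (s.length : Int) - 1 := by omega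
    rw [if_pos this]
    refine ⟨by simpa using hlen, ?_⟩
    intro j hj1 hj2
    rw [Int.toNat_natCast, getD_set']
    by_cases hjk : j = k
    · subst hjk
      rw [if_pos ⟨rfl, by omega⟩]
      have : s.length - 1 + 1 = s.length := by omega
      rw [trT_singleton (s.drop j) (by simp; omega)]
    · rw [if_neg (by omega)]
      exact hinv j (by omega) hj2
  · have hne : ¬ ((k : Int) = (s.length : Int) - 1) := by omega
    rw [if_neg hne]
    have hk2 : k + 1 < s.length := by omega
    simp only [Int.toNat_natCast, hcast1, hcast2]
    constructor
    · simpa using hlen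
    intro j hj1 hj2
    rw [getD_set']
    by_cases hjk : j = k
    · subst hjk
      rw [if_pos ⟨rfl, by omega⟩]
      rw [hinv (j + 1) (by omega) hk2]
      by_cases hpen : (j : Int) = (s.length : Int) - 2
      · have hj2' : j + 2 = s.length := by omega
        rw [if_pos hpen, trT_drop s j hk2, hj2']
        simp [trT]
      · have hj2' : j + 2 < s.length := by omega
        rw [if_neg hpen, trT_drop s j hk2, hinv (j + 2) (by omega) hj2']
    · rw [if_neg (by omega)]
      exact hinv j (by omega) hj2

theorem aLoop_inv (s : List Char) : ∀ (k : Nat) (counts : List Int), k < s.length →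
    InvA s (k + 1) counts →
    InvA s 0 ((PySem.List.pyRange (k : Int) (-1) (-1)).foldl (aStep s (s.length : Int)) counts) := by
  intro k
  induction k with
  | zero =>
    intro counts hk h
    rw [PySem.List.pyRange_neg_one_cons (by omega),
        PySem.List.pyRange_neg_one_eq_nil (by omega)]
    simpa using aStep_inv s 0 counts hk h
  | succ k ih =>
    intro counts hk h
    rw [PySem.List.pyRange_neg_one_cons (by omega)]
    simp only [List.foldl_cons]
    rw [show ((k + 1 : Nat) : Int) - 1 = (k : Int) by omega]
    exact ih _ (by omega) (aStep_inv s (k + 1) counts hk h)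

theorem portA_value (num : Int) (hnn : 0 ≤ num) (hne : PySem.Int.toChars num ≠ []) :
    getTranslationCount num = some (trT (PySem.Int.toChars num)) := by
  unfold getTranslationCount
  rw [if_neg (by omega)]
  dsimp only
  set s := PySem.Int.toChars num with hs
  have hlen : 0 < s.length := List.length_pos_iff.mpr hne
  set cfin := (PySem.List.pyRange ((s.length : Int) - 1) (-1) (-1)).foldl
      (aStep s (s.length : Int)) (List.replicate s.length 0) with hcf
  have hinit : InvA s s.length (List.replicate s.length 0) :=
    ⟨by simp, by intro j h1 h2; omega⟩
  have hfin := aLoop_inv s (s.length - 1) (List.replicate s.length 0) (by omega)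
    (by rwa [Nat.sub_add_cancel (by omega)])
  rw [show ((s.length - 1 : Nat) : Int) = (s.length : Int) - 1 by omega, ← hcf] at hfin
  obtain ⟨hl, hv⟩ := hfin
  have h0 := hv 0 (by omega) hlen
  simp only [List.drop_zero] at h0
  obtain ⟨c0, ct, hct⟩ : ∃ c0 ct, cfin = c0 :: ct := by
    cases hx : cfin with
    | nil => rw [hx] at hl; simp at hl; omega
    | cons c0 ct => exact ⟨c0, ct, rfl⟩
  rw [hct] at h0 ⊢
  simp only [PySem.List.pyGet?, PySem.List.pyIdx?] at *
  simp only [List.getD_cons_zero] at h0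
  simp [h0]

-- snoc recurrence for trT, linking the last-digit split to the string spec
theorem trT_snoc (xs : List Char) (d : Char) (h : xs ≠ []) :
    trT (xs ++ [d]) = trT xs +
      (if 10 ≤ pairVal (xs.getD (xs.length - 1) ' ') d ∧
          pairVal (xs.getD (xs.length - 1) ' ') d ≤ 25
       then trT xs.dropLast else 0) := by
  induction xs using trT.induct with
  | case1 => simp at h
  | case2 a => simp [trT]
  | case3 a b t ih1 ih2 =>
    cases t with
    | nil => simp [trT]; split_ifs <;> omega
    | cons c t' =>
      have h1 := ih1 (by simp)
      have h2 := ih2 (by simp)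
      simp only [trT, List.cons_append, List.length_cons, List.getD_cons_succ,
        Nat.add_sub_cancel, List.dropLast_cons₂] at h1 h2 ⊢
      split_ifs at h1 h2 ⊢ <;> omega

-- Nat.toDigitsCore: the accumulator is just appended
theorem toDigitsCore_acc (b : Nat) : ∀ (f n : Nat) (acc : List Char),
    Nat.toDigitsCore b f n acc = Nat.toDigitsCore b f n [] ++ acc := by
  intro f
  induction f with
  | zero => intro n acc; simp [Nat.toDigitsCore]
  | succ f ih =>
    intro n acc
    simp only [Nat.toDigitsCore]
    split_ifs
    · simp
    · rw [ih (n / b) [Nat.digitChar (n % b)], ih (n / b) (Nat.digitChar (n % b) :: acc)]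
      simp

-- Nat.toDigitsCore: any fuel above n gives the same digits
theorem toDigitsCore_fuel (b : Nat) (hb : 2 ≤ b) : ∀ (f g n : Nat) (acc : List Char),
    n < f → n < g → Nat.toDigitsCore b f n acc = Nat.toDigitsCore b g n acc := by
  intro f
  induction f with
  | zero => intro g n acc hf; omega
  | succ f ih =>
    intro g n acc hf hg
    cases g with
    | zero => omega
    | succ g =>
      simp only [Nat.toDigitsCore]
      split_ifs with h
      · rfl
      · have hn : 0 < n := by
          by_contra hc
          simp [show n = 0 by omega] at h
        have hlt : n / b < n := Nat.div_lt_self hn (by omega)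
        exact ih g (n / b) _ (by omega) (by omega)

theorem toDigits_lt (m : Nat) (h : m < 10) : Nat.toDigits 10 m = [Nat.digitChar m] := by
  simp [Nat.toDigits, Nat.toDigitsCore, Nat.div_eq_of_lt h, Nat.mod_eq_of_lt h]

theorem toDigits_snoc (m : Nat) (h : 10 ≤ m) :
    Nat.toDigits 10 m = Nat.toDigits 10 (m / 10) ++ [Nat.digitChar (m % 10)] := by
  have hne : ¬ (m / 10 = 0) := by omega
  rw [Nat.toDigits, Nat.toDigitsCore, if_neg hne,
      toDigitsCore_acc 10 m (m / 10) [Nat.digitChar (m % 10)],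
      toDigitsCore_fuel 10 (by omega) m (m / 10 + 1) (m / 10) [] (by omega) (by omega)]
  rfl

theorem digitChar_toNat (a : Nat) (h : a < 10) : (Nat.digitChar a).toNat = 48 + a := by
  interval_cases a <;> decide

theorem pairVal_digitChar (a b : Nat) (ha : a < 10) (hb : b < 10) :
    pairVal (Nat.digitChar a) (Nat.digitChar b) = ((a * 10 + b : Nat) : Int) := by
  rw [pairVal, digitChar_toNat a ha, digitChar_toNat b hb]
  push_cast
  ring

theorem toDigits_ne_nil (m : Nat) : Nat.toDigits 10 m ≠ [] := by
  by_cases h : m < 10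
  · rw [toDigits_lt m h]; simp
  · rw [toDigits_snoc m (by omega)]; simp

-- B computes the same digit-string count, by strong induction on the number
theorem bCount_eq (m : Nat) : bCount (m : Int) = trT (Nat.toDigits 10 m) := by
  induction m using Nat.strong_induction_on with
  | _ m ih =>
    by_cases h1 : m < 10
    · rw [bCount, if_pos (by exact_mod_cast h1 : (m:Int) < 10), toDigits_lt m h1, trT]
    · have h1' : ¬ ((m : Int) < 10) := by exact_mod_cast h1
      have hd10 : PySem.Int.floordiv (m : Int) 10 = ((m / 10 : Nat) : Int) := by
        exact_mod_cast PySem.Int.floordiv_natCast m 10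
      have hd100 : PySem.Int.floordiv (m : Int) 100 = ((m / 100 : Nat) : Int) := by
        exact_mod_cast PySem.Int.floordiv_natCast m 100
      have hm100 : PySem.Int.mod (m : Int) 100 = ((m % 100 : Nat) : Int) := by
        exact_mod_cast PySem.Int.mod_natCast m 100
      rw [bCount, if_neg h1']
      simp only [hd10, hd100, hm100]
      rw [ih (m / 10) (by omega), ih (m / 100) (by omega)]
      rw [toDigits_snoc m (by omega),
          trT_snoc (Nat.toDigits 10 (m / 10)) _ (toDigits_ne_nil _)]
      have hpair : pairVal ((Nat.toDigits 10 (m / 10)).getD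
            ((Nat.toDigits 10 (m / 10)).length - 1) ' ') (Nat.digitChar (m % 10)) =
          ((m % 100 : Nat) : Int) ∧
          trT (Nat.toDigits 10 (m / 10)).dropLast = trT (Nat.toDigits 10 (m / 100)) := by
        by_cases h2 : m / 10 < 10
        · rw [toDigits_lt (m / 10) h2]
          constructor
          · simp only [List.length_singleton, Nat.sub_self, List.getD_cons_zero]
            rw [pairVal_digitChar (m / 10) (m % 10) h2 (by omega)]
            congr 1
            omega
          · -- both sides count the empty / single-'0' string: 1
            rw [show m / 100 = 0 by omega, toDigits_lt 0 (by omega)]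
            rfl
        · rw [toDigits_snoc (m / 10) (by omega)]
          constructor
          · rw [List.getD_eq_getElem _ ' '
                (by simp only [List.length_append, List.length_singleton]; omega)]
            simp only [List.length_append, List.length_singleton, Nat.add_sub_cancel]
            rw [List.getElem_append_right (by omega)]
            simp only [Nat.sub_self, List.getElem_singleton]
            rw [pairVal_digitChar (m / 10 % 10) (m % 10) (by omega) (by omega)]
            congr 1
            omega
          · rw [List.dropLast_concat, Nat.div_div_eq_div_mul]
      rw [hpair.1, hpair.2]
      by_cases hc : 10 ≤ m % 100 ∧ m % 100 ≤ 25
      · rw [if_pos (by exact_mod_cast hc), if_pos (by exact_mod_cast hc)]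
      · rw [if_neg (by exact_mod_cast hc), if_neg (by exact_mod_cast hc)]
        omega

theorem toChars_eq (num : Int) (h : 0 ≤ num) :
    PySem.Int.toChars num = Nat.toDigits 10 num.toNat := by
  simp only [PySem.Int.toChars]
  rw [if_neg (by omega)]

-- ===== VERDICT (by name: the statement is the Claim_ definition above) =====
theorem getTranslationCount_spec : Claim_equal_getTranslationCount := by
  intro num _
  unfold Spec_getTranslationCount
  by_cases hneg : num < 0
  · unfold getTranslationCount getTranslationCount_alt
    rw [if_pos hneg, if_pos hneg]
  · have hnn : 0 ≤ num := by omega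
    have hne : PySem.Int.toChars num ≠ [] := by
      rw [toChars_eq num hnn]; exact toDigits_ne_nil _
    rw [portA_value num hnn hne]
    unfold getTranslationCount_alt
    have hb := bCount_eq num.toNat
    rw [show ((num.toNat : Nat) : Int) = num by omega] at hb
    rw [if_neg hneg, toChars_eq num hnn, hb]
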